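-- pv_equiv track=rewrite | github.com/shinsj4653/CodingTest | 2.구현/20436_혁진.py | find_key_right
-- ===== SOURCE A (Python) =====
-- keyboard_right = [['y', 'u', 'i', 'o', 'p'], ['h','j','k','l'],['b','n','m']]
--
-- def find_key_right(ch):
--     for i in range(3):
--         if ch in keyboard_right[i]:
--             if i==2:
--                 return i, 4+keyboard_right[i].index(ch)
--             else:
--                 return i, 5+keyboard_right[i].index(ch)
--         else:
--             continue
--     return -1, -1
-- ===== SOURCE B (Python) =====
-- _FLAT = "yuiophjklbnm"  # rows 0..2 concatenated: 0-4 row 0, 5-8 row 1, 9-11 row 2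
--
-- def find_key_right(ch):
--     i = _FLAT.find(ch) if len(ch) == 1 else -1
--     if i < 0:
--         return -1, -1
--     if i < 5:
--         return 0, 5 + i
--     if i < 9:
--         return 1, i          # 5 + (i - 5)
--     return 2, i - 5          # 4 + (i - 9)
-- ===== Notes on version B (the rewrite author's own statement) =====
-- stated objective: alternative
-- what changed: B flattens the keyboard to one string and decodes a single flat find() index arithmetically into (row, col) by range tests, instead of A's loop over rows with a membership test and an inner .index scan per row.
import Mathlib
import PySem

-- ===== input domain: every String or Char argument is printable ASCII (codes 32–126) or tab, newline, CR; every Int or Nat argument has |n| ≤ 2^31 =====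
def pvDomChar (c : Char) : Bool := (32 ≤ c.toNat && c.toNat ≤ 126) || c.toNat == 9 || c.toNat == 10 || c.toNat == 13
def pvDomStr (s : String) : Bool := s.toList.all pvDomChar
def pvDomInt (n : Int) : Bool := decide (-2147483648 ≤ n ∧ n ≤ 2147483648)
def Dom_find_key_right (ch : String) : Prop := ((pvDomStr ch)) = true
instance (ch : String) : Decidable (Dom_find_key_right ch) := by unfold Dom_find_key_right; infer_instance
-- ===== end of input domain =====

-- B flattens the keyboard to one string and decodes a single find() index arithmetically; alternative decomposition, no speed claim.

-- ===== PORT A =====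
def kbRight : List (List String) := [["y","u","i","o","p"], ["h","j","k","l"], ["b","n","m"]]

-- the for-loop over range(3) with early return
def fkrLoop (ch : String) : List Int → Int × Int
  | [] => (-1, -1)
  | i :: rest =>
    match PySem.List.pyGet? kbRight i with
    | none => (-1, -1)  -- unreachable totality guard (i ∈ range(3))
    | some row =>
      if row.contains ch then
        if i == 2 then (i, 4 + (((PySem.List.index? row ch).getD 0 : Nat) : Int))
        else (i, 5 + (((PySem.List.index? row ch).getD 0 : Nat) : Int))
      else fkrLoop ch rest

def find_key_right (ch : String) : Int × Int := fkrLoop ch (PySem.List.pyRange 0 3 1)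

-- ===== PORT B =====
-- _FLAT = "yuiophjklbnm"; i = _FLAT.find(ch) if len(ch) == 1 else -1, then range tests on i
def flatRight : String := "yuiophjklbnm"

def find_key_right_alt (ch : String) : Int × Int :=
  let i : Int := if PySem.Str.len ch == 1 then PySem.Str.find flatRight ch else -1
  if i < 0 then (-1, -1)
  else if i < 5 then (0, 5 + i)
  else if i < 9 then (1, i)
  else (2, i - 5)

-- ===== PRECONDITION & SPEC =====
def Spec_find_key_right (ch : String) (out : Int × Int) : Prop := out = find_key_right_alt ch
instance (ch : String) (out : Int × Int) : Decidable (Spec_find_key_right ch out) := by unfold Spec_find_key_right; infer_instance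

-- ===== CLAIM (what is proved, stated in full; the proofs are below) =====
def Claim_equal_find_key_right : Prop := ∀ (ch : String), Dom_find_key_right ch → Spec_find_key_right ch (find_key_right ch)

-- ===== LEMMAS AND PROOFS =====

-- A returns (-1,-1) when ch is none of the 12 keys
theorem fkrA_miss (ch : String)
    (h1 : ch ≠ "y") (h2 : ch ≠ "u") (h3 : ch ≠ "i") (h4 : ch ≠ "o") (h5 : ch ≠ "p")
    (h6 : ch ≠ "h") (h7 : ch ≠ "j") (h8 : ch ≠ "k") (h9 : ch ≠ "l")
    (h10 : ch ≠ "b") (h11 : ch ≠ "n") (h12 : ch ≠ "m") :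
    find_key_right ch = (-1, -1) := by
  have hr : PySem.List.pyRange 0 3 1 = [0, 1, 2] := by decide
  simp [find_key_right, hr, fkrLoop, kbRight, PySem.List.pyGet?, PySem.List.pyIdx?,
        h1, h2, h3, h4, h5, h6, h7, h8, h9, h10, h11, h12]

-- B returns (-1,-1) when ch is none of the 12 keys
theorem fkrB_miss (ch : String)
    (h1 : ch ≠ "y") (h2 : ch ≠ "u") (h3 : ch ≠ "i") (h4 : ch ≠ "o") (h5 : ch ≠ "p")
    (h6 : ch ≠ "h") (h7 : ch ≠ "j") (h8 : ch ≠ "k") (h9 : ch ≠ "l")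
    (h10 : ch ≠ "b") (h11 : ch ≠ "n") (h12 : ch ≠ "m") :
    find_key_right_alt ch = (-1, -1) := by
  unfold find_key_right_alt
  rcases hl : ch.toList with _ | ⟨c, cs⟩
  · simp [PySem.Str.len_eq, hl]
  rcases cs with _ | ⟨c2, rest⟩
  · -- single character: find fails because c is not among the flat keys
    have hfind : PySem.Chars.find flatRight.toList [c] = -1 := by
      have hmem : c ∉ flatRight.toList := by
        intro hc
        simp [flatRight] at hc
        have hch : ∀ t : String, t.toList = [c] → ch = t := by
          intro t ht; exact String.toList_inj.mp (hl.trans ht.symm)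
        rcases hc with h | h | h | h | h | h | h | h | h | h | h | h <;> subst h
        · exact h1 (hch "y" rfl)
        · exact h2 (hch "u" rfl)
        · exact h3 (hch "i" rfl)
        · exact h4 (hch "o" rfl)
        · exact h5 (hch "p" rfl)
        · exact h6 (hch "h" rfl)
        · exact h7 (hch "j" rfl)
        · exact h8 (hch "k" rfl)
        · exact h9 (hch "l" rfl)
        · exact h10 (hch "b" rfl)
        · exact h11 (hch "n" rfl)
        · exact h12 (hch "m" rfl)
      rw [PySem.Chars.find_eq_neg_one_iff, List.singleton_infix_iff]
      exact hmem
    simp [PySem.Str.len_eq, hl, hfind]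
  · have hne : ((rest.length : Int) + 1) ≠ 0 := by omega
    simp [PySem.Str.len_eq, hl, hne]

-- ===== VERDICT (by name: the statement is the Claim_ definition above) =====
theorem find_key_right_spec : Claim_equal_find_key_right := by
  intro ch _
  unfold Spec_find_key_right
  by_cases h1 : ch = "y"; · subst h1; decide
  by_cases h2 : ch = "u"; · subst h2; decide
  by_cases h3 : ch = "i"; · subst h3; decide
  by_cases h4 : ch = "o"; · subst h4; decide
  by_cases h5 : ch = "p"; · subst h5; decide
  by_cases h6 : ch = "h"; · subst h6; decide
  by_cases h7 : ch = "j"; · subst h7; decide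
  by_cases h8 : ch = "k"; · subst h8; decide
  by_cases h9 : ch = "l"; · subst h9; decide
  by_cases h10 : ch = "b"; · subst h10; decide
  by_cases h11 : ch = "n"; · subst h11; decide
  by_cases h12 : ch = "m"; · subst h12; decide
  rw [fkrA_miss ch h1 h2 h3 h4 h5 h6 h7 h8 h9 h10 h11 h12,
      fkrB_miss ch h1 h2 h3 h4 h5 h6 h7 h8 h9 h10 h11 h12]
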